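-- pv_equiv track=rewrite | github.com/kakaocloud-school-study/codetree | Park/Baekjoon/바이러스.py | dfs
-- ===== SOURCE A (Python) =====
-- def dfs(graph, start, visited):
--     stack = [start]  # DFS를 위한 스택 초기화
--     visited[start] = True  # 시작 컴퓨터 방문 기록
--     count = 0  # 웜 바이러스에 걸린 컴퓨터 수
--
--     while stack:
--         node = stack.pop()  # 스택에서 컴퓨터 하나를 꺼내기
--         count += 1  # 방문했으므로 카운트 증가
--         for neighbor in graph[node]:  # 인접한 모든 컴퓨터에 대해
--             if not visited[neighbor]:  # 방문하지 않았다면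
--                 stack.append(neighbor)  # 스택에 추가
--                 visited[neighbor] = True  # 방문 기록
--
--     return count - 1  # 시작 컴퓨터는 제외해야 하므로 -1
-- ===== SOURCE B (Python) =====
-- def dfs(graph, start, visited):
--     visited[start] = True
--
--     def go(node):
--         total = 1
--         for nb in graph[node]:
--             if not visited[nb]:
--                 visited[nb] = True
--                 total += go(nb)
--         return total
--
--     return go(start) - 1
-- ===== Notes on version B (the rewrite author's own statement) =====
-- stated objective: alternative
-- what changed: Replaces the explicit-stack iterative DFS with a recursive DFS helper that marks a neighbour and returns 1 plus the sum of recursive calls on its unvisited neighbours; Pre_ excludes exactly the inputs where A's graph[node]/visited[neighbor] lookups raise KeyError (stated via the reachable-node set), plus visited lists with duplicate keys, which no real Python dict can produce.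
import Mathlib
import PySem

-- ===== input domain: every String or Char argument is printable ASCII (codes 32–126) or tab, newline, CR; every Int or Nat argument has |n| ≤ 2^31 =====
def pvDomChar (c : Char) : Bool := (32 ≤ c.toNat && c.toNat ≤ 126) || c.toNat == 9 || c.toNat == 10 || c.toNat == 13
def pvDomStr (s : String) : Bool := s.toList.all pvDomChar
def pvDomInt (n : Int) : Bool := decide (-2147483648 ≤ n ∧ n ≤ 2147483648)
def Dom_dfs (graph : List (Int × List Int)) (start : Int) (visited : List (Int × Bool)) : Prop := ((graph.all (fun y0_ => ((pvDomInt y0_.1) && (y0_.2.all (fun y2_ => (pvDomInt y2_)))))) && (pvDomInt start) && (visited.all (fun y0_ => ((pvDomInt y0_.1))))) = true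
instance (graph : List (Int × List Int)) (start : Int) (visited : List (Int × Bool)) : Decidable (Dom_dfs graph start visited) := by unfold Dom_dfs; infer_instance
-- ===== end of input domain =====

-- B replaces A's explicit-stack DFS loop (pop one node, count it, push unvisited neighbours) by a
-- recursive DFS helper: go(node) returns 1 plus the sum of go(nb) over nb's unvisited neighbours,
-- marking each before recursing; same return value on Pre_.
-- Both Pythons mutate `visited` in place; under Pre_ they perform the SAME mutation, and the
-- theorem below is about the return value (the ports thread the dict functionally).

-- number of entries of a visited-dict holding True (used by the termination measure of A's loop)
def tcL (l : List (Int × Bool)) : Nat := (l.filter (fun p => p.2)).length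

def tcD (d : PySem.Dict Int Bool) : Nat := tcL d.items

-- ===== PORT A =====
-- body of A's inner `for neighbor in graph[node]` loop; state = (stack, visited).
-- `none` is where Python raises KeyError on `visited[neighbor]` (excluded by Pre_dfs).
def dfsStepA (p : List Int × PySem.Dict Int Bool) (nb : Int) : List Int × PySem.Dict Int Bool :=
  match PySem.Dict.get? p.2 nb with
  | some false => (p.1 ++ [nb], PySem.Dict.insert p.2 nb true)
  | _ => p

-- termination helpers for A's loop (cited by decreasing_by)
theorem tcL_le_length (l : List (Int × Bool)) : tcL l ≤ l.length :=
  List.length_filter_le _ _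

theorem tcL_cons (a : Int × Bool) (t : List (Int × Bool)) :
    tcL (a :: t) = (if a.2 then 1 else 0) + tcL t := by
  by_cases h : a.2 <;> simp [tcL, h] <;> omega

theorem tcL_lt_of_mem_false (l : List (Int × Bool)) (nb : Int) (h : (nb, false) ∈ l) :
    tcL l < l.length := by
  induction l with
  | nil => cases h
  | cons a t ih =>
    have hle := tcL_le_length t
    rw [tcL_cons]
    simp only [List.mem_cons] at h
    simp only [List.length_cons]
    rcases h with h | h
    · subst h; simp; omega
    · have := ih h
      by_cases hb : a.2 <;> simp [hb] <;> omega

theorem tcL_map_flip_mono (l : List (Int × Bool)) (nb : Int) :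
    tcL l ≤ tcL (l.map (fun p => if p.1 = nb then (nb, true) else p)) := by
  induction l with
  | nil => simp [tcL]
  | cons a t ih =>
    simp only [List.map_cons, tcL_cons]
    by_cases hk : a.1 = nb <;> by_cases hb : a.2 <;> simp [hk, hb] <;> omega

theorem tcL_map_flip_ge (l : List (Int × Bool)) (nb : Int) (h : (nb, false) ∈ l) :
    tcL l + 1 ≤ tcL (l.map (fun p => if p.1 = nb then (nb, true) else p)) := by
  induction l with
  | nil => cases h
  | cons a t ih =>
    simp only [List.mem_cons] at h
    have mono := tcL_map_flip_mono t nb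
    simp only [List.map_cons, tcL_cons]
    rcases h with h | h
    · subst h; simp; omega
    · have := ih h
      by_cases hk : a.1 = nb <;> by_cases hb : a.2 <;> simp [hk, hb] <;> omega

theorem stepA_meas (p : List Int × PySem.Dict Int Bool) (nb : Int) :
    (dfsStepA p nb).2.size = p.2.size ∧
    (dfsStepA p nb).1.length + 2 * ((dfsStepA p nb).2.size - tcD (dfsStepA p nb).2) ≤
      p.1.length + 2 * (p.2.size - tcD p.2) := by
  unfold dfsStepA
  match hg : PySem.Dict.get? p.2 nb with
  | some false =>
    have hc : p.2.contains nb = true := by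
      rw [PySem.Dict.contains_eq_isSome_get?, hg]; rfl
    have hit := PySem.Dict.items_insert_of_contains p.2 true hc
    have hmem := PySem.Dict.mem_items_of_get?_eq_some p.2 hg
    have hlt : tcD p.2 < p.2.size := tcL_lt_of_mem_false _ nb hmem
    simp only [beq_iff_eq] at hit
    have hge : tcD p.2 + 1 ≤ tcD (PySem.Dict.insert p.2 nb true) := by
      unfold tcD; rw [hit]; exact tcL_map_flip_ge _ nb hmem
    have hsz : (PySem.Dict.insert p.2 nb true).size = p.2.size := by
      show (PySem.Dict.insert p.2 nb true).items.length = p.2.items.length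
      rw [hit, List.length_map]
    have hle : tcD (PySem.Dict.insert p.2 nb true) ≤ (PySem.Dict.insert p.2 nb true).size :=
      tcL_le_length (PySem.Dict.insert p.2 nb true).items
    refine ⟨hsz, ?_⟩
    simp only [List.length_append, List.length_cons, List.length_nil]
    omega
  | some true => exact ⟨rfl, le_refl _⟩
  | none => exact ⟨rfl, le_refl _⟩

theorem foldA_meas (ns : List Int) : ∀ (st : List Int) (vis : PySem.Dict Int Bool),
    (ns.foldl dfsStepA (st, vis)).1.length +
      2 * ((ns.foldl dfsStepA (st, vis)).2.size - tcD (ns.foldl dfsStepA (st, vis)).2) ≤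
    st.length + 2 * (vis.size - tcD vis) := by
  induction ns with
  | nil => intro st vis; simp [List.foldl]
  | cons nb t ih =>
    intro st vis
    have h1 := stepA_meas (st, vis) nb
    have h2 := ih (dfsStepA (st, vis) nb).1 (dfsStepA (st, vis) nb).2
    simp only [List.foldl_cons]
    calc _ ≤ _ := h2
      _ ≤ _ := h1.2

-- A's `while stack:` loop; returns (count, final visited)
def dfsLoopA (g : PySem.Dict Int (List Int)) (stack : List Int) (vis : PySem.Dict Int Bool)
    (count : Int) : Int × PySem.Dict Int Bool :=
  if h : stack = [] then (count, vis)
  else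
    dfsLoopA g ((PySem.Dict.getD g (stack.getLast h) []).foldl dfsStepA (stack.dropLast, vis)).1
      ((PySem.Dict.getD g (stack.getLast h) []).foldl dfsStepA (stack.dropLast, vis)).2
      (count + 1)
termination_by stack.length + 2 * (vis.size - tcD vis)
decreasing_by
  have hm := foldA_meas (PySem.Dict.getD g (stack.getLast h) []) stack.dropLast vis
  have hl : stack.dropLast.length = stack.length - 1 := by simp
  have hpos : 0 < stack.length := List.length_pos_iff.mpr h
  omega

def dfs (graph : List (Int × List Int)) (start : Int) (visited : List (Int × Bool)) : Int :=
  (dfsLoopA (PySem.Dict.mk graph) [start]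
    (PySem.Dict.insert (PySem.Dict.mk visited) start true) 0).1 - 1

-- ===== PORT B =====
-- number of entries of a visited-dict holding False: a bound on B's recursion depth, used only
-- as fuel to make the recursion total (each nested call follows a False→True flip, so the fuel
-- below never runs out; the fuel-0 branch is unreachable)
def fcD (d : PySem.Dict Int Bool) : Nat := (d.items.filter (fun p => !p.2)).length

mutual
-- Python's `def go(node)`: 1 plus the sum of go(nb) over unvisited neighbours, threading `visited`
def goB (g : PySem.Dict Int (List Int)) (fuel : Nat) (node : Int)
    (vis : PySem.Dict Int Bool) : Int × PySem.Dict Int Bool :=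
  match fuel with
  | 0 => (1, vis)
  | Nat.succ f =>
    let r := goListB g f (PySem.Dict.getD g node []) vis
    (1 + r.1, r.2)
termination_by (fuel, 0)

-- the `for nb in graph[node]` body of go: `none` is where Python raises KeyError on
-- `visited[nb]` (excluded by Pre_dfs)
def goListB (g : PySem.Dict Int (List Int)) (fuel : Nat) (l : List Int)
    (vis : PySem.Dict Int Bool) : Int × PySem.Dict Int Bool :=
  match l with
  | [] => (0, vis)
  | nb :: t =>
    if PySem.Dict.get? vis nb = some false then
      let r1 := goB g fuel nb (PySem.Dict.insert vis nb true)
      let r2 := goListB g fuel t r1.2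
      (r1.1 + r2.1, r2.2)
    else goListB g fuel t vis
termination_by (fuel, l.length + 1)
end

def dfs_alt (graph : List (Int × List Int)) (start : Int) (visited : List (Int × Bool)) : Int :=
  (goB (PySem.Dict.mk graph)
      (fcD (PySem.Dict.insert (PySem.Dict.mk visited) start true) + 1) start
      (PySem.Dict.insert (PySem.Dict.mk visited) start true)).1 - 1

-- the set of nodes A's (and B's) traversal actually processes: plain saturation of {start}
-- under "nb is an adjacency entry of a processed node, is not start, and visited maps it to
-- False".  Used only by Pre_dfs below: it is a membership condition (which lookups the Python
-- performs), not a re-run of either port — no stack, no recursion state, no counting, no marking.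
def pvExpand (graph : List (Int × List Int)) (visited : List (Int × Bool)) (start : Int)
    (S : List Int) : List Int :=
  S.foldl (fun acc m =>
    ((PySem.Dict.mk graph).getD m []).foldl (fun acc2 nb =>
      if nb ≠ start ∧ PySem.Dict.get? (PySem.Dict.mk visited) nb = some false
      then PySem.Set.add acc2 nb else acc2) acc) S

def pvReached (graph : List (Int × List Int)) (visited : List (Int × Bool)) (start : Int) :
    List Int :=
  (pvExpand graph visited start)^[visited.length + 1] [start]

-- ===== PRECONDITION & SPEC =====
-- Pre_dfs is exactly "A raises no KeyError": every node the traversal processes (pvReached)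
-- is a key of graph, and every adjacency entry of such a node is start or a key of visited;
-- plus visited's keys are duplicate-free (automatic for any real Python dict, whose keys are
-- unique by construction).
def Pre_dfs (graph : List (Int × List Int)) (start : Int) (visited : List (Int × Bool)) : Prop :=
  (visited.map Prod.fst).Nodup ∧
  ∀ m ∈ pvReached graph visited start, m ∈ graph.map Prod.fst ∧
    ∀ nb ∈ PySem.Dict.getD (PySem.Dict.mk graph) m [], (nb = start ∨ nb ∈ visited.map Prod.fst)

instance (graph : List (Int × List Int)) (start : Int) (visited : List (Int × Bool)) :
    Decidable (Pre_dfs graph start visited) := by unfold Pre_dfs; infer_instance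

def pvWitness_dfs : (List (Int × List Int)) × Int × (List (Int × Bool)) :=
  ([(0, [1, 2]), (1, [0]), (2, [2])], 0, [(0, false), (1, false), (2, false), (3, true)])

def Spec_dfs (graph : List (Int × List Int)) (start : Int) (visited : List (Int × Bool)) (out : Int) : Prop := out = dfs_alt graph start visited
instance (graph : List (Int × List Int)) (start : Int) (visited : List (Int × Bool)) (out : Int) : Decidable (Spec_dfs graph start visited out) := by unfold Spec_dfs; infer_instance

-- ===== CLAIM (what is proved, stated in full; the proofs are below) =====
def Claim_equal_dfs : Prop := ∀ (graph : List (Int × List Int)) (start : Int) (visited : List (Int × Bool)), Dom_dfs graph start visited → Pre_dfs graph start visited → Spec_dfs graph start visited (dfs graph start visited)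

-- ===== LEMMAS AND PROOFS =====

-- the nodes A and B mark during the run: reachable from start through initially-unvisited nodes
inductive Reach (g : PySem.Dict Int (List Int)) (start : Int) (v1 : PySem.Dict Int Bool) : Int → Prop
  | base : Reach g start v1 start
  | step {m n : Int} : Reach g start v1 m → (m = start ∨ PySem.Dict.get? v1 m = some false) →
      n ∈ PySem.Dict.getD g m [] → PySem.Dict.get? v1 n = some false → Reach g start v1 n

theorem tcL_map_flip {l : List (Int × Bool)} {nb : Int} (hnd : (l.map Prod.fst).Nodup)
    (h : (nb, false) ∈ l) :
    tcL (l.map (fun p => if p.1 = nb then (nb, true) else p)) = tcL l + 1 := by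
  induction l with
  | nil => cases h
  | cons a t ih =>
    rw [List.map_cons] at hnd
    obtain ⟨hhead, htail⟩ := List.nodup_cons.mp hnd
    simp only [List.mem_cons] at h
    rcases h with h' | h'
    · have ha1 : a.1 = nb := by rw [← h']
      have ha2 : a.2 = false := by rw [← h']
      have hid : t.map (fun p => if p.1 = nb then (nb, true) else p) = t := by
        conv_rhs => rw [← List.map_id t]
        apply List.map_congr_left
        intro p hp
        have hne : p.1 ≠ nb := fun he => hhead (by rw [ha1]; exact List.mem_map.mpr ⟨p, hp, he⟩)
        simp [hne]
      simp only [List.map_cons, tcL_cons, hid, ha1, ha2, if_pos rfl]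
      simp
      omega
    · have hane : a.1 ≠ nb :=
        fun he => hhead (by rw [he]; exact List.mem_map.mpr ⟨(nb, false), h', rfl⟩)
      simp only [List.map_cons, tcL_cons]
      rw [ih htail h']
      by_cases hb : a.2 <;> simp [hane, hb] <;> omega

-- trues and falses of a visited-dict partition its items
theorem tcL_add_fcL (l : List (Int × Bool)) :
    tcL l + (l.filter (fun p => !p.2)).length = l.length := by
  induction l with
  | nil => simp [tcL]
  | cons a t ih =>
    by_cases h : a.2 <;> simp [tcL, h] at ih ⊢ <;> omega

theorem fcD_pos_of_false {vis : PySem.Dict Int Bool} {nb : Int}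
    (hg : PySem.Dict.get? vis nb = some false) : 0 < fcD vis := by
  have hmem := PySem.Dict.mem_items_of_get?_eq_some vis hg
  have : (nb, false) ∈ vis.items.filter (fun p => !p.2) :=
    List.mem_filter.mpr ⟨hmem, rfl⟩
  unfold fcD
  exact List.length_pos_iff.mpr (List.ne_nil_of_mem this)

-- effect of flipping one False entry to True (nodup keys): sizes kept, tcD +1, fcD −1
theorem flip_counts (vis : PySem.Dict Int Bool) (nb : Int)
    (hndv : (vis.items.map Prod.fst).Nodup)
    (hg : PySem.Dict.get? vis nb = some false) :
    tcD (PySem.Dict.insert vis nb true) = tcD vis + 1 ∧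
    (PySem.Dict.insert vis nb true).items.length = vis.items.length ∧
    fcD (PySem.Dict.insert vis nb true) + 1 = fcD vis := by
  have hc : vis.contains nb = true := by
    rw [PySem.Dict.contains_eq_isSome_get?, hg]; rfl
  have hit := PySem.Dict.items_insert_of_contains vis true hc
  simp only [beq_iff_eq] at hit
  have hmem := PySem.Dict.mem_items_of_get?_eq_some vis hg
  have htc : tcD (PySem.Dict.insert vis nb true) = tcD vis + 1 := by
    unfold tcD; rw [hit]; exact tcL_map_flip hndv hmem
  have hlen : (PySem.Dict.insert vis nb true).items.length = vis.items.length := by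
    rw [hit, List.length_map]
  have h1 := tcL_add_fcL vis.items
  have h2 := tcL_add_fcL (PySem.Dict.insert vis nb true).items
  have hpos := fcD_pos_of_false hg
  refine ⟨htc, hlen, ?_⟩
  unfold fcD at *
  unfold tcD at htc
  omega

-- a dict's item count is its key count
theorem items_len_eq_keys_len (d : PySem.Dict Int Bool) : d.items.length = d.keys.length := by
  have : d.keys = d.items.map Prod.fst := rfl
  rw [this, List.length_map]

-- the joint invariant of B's recursion: result = (count, final visited) with
-- count = k + (new Trues), keys preserved, Trues monotone, new Trues reachable and saturated
def GoalCore (g : PySem.Dict Int (List Int)) (start : Int) (v1 vis : PySem.Dict Int Bool)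
    (k : Int) (r : Int × PySem.Dict Int Bool) : Prop :=
  r.1 = k + (tcD r.2 : Int) - (tcD vis : Int) ∧
  r.2.keys = v1.keys ∧
  tcD vis ≤ tcD r.2 ∧
  (∀ n, vis.get? n = some true → r.2.get? n = some true) ∧
  (∀ n, r.2.get? n = some true → vis.get? n = some true ∨ Reach g start v1 n) ∧
  (∀ n, r.2.get? n = some true → vis.get? n = some true ∨
    ∀ nb ∈ PySem.Dict.getD g n [], r.2.get? nb = some true)

def PStmt (g : PySem.Dict Int (List Int)) (start : Int) (v1 : PySem.Dict Int Bool)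
    (fuel : Nat) : Prop :=
  ∀ (node : Int) (vis : PySem.Dict Int Bool),
    fcD vis + 1 ≤ fuel →
    vis.keys = v1.keys →
    (∀ n, v1.get? n = some true → vis.get? n = some true) →
    Reach g start v1 node → (node = start ∨ PySem.Dict.get? v1 node = some false) →
    GoalCore g start v1 vis 1 (goB g fuel node vis) ∧
    ∀ nb ∈ PySem.Dict.getD g node [], (goB g fuel node vis).2.get? nb = some true

def QStmt (g : PySem.Dict Int (List Int)) (start : Int) (v1 : PySem.Dict Int Bool)
    (fuel : Nat) : Prop :=
  ∀ (l : List Int) (vis : PySem.Dict Int Bool),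
    fcD vis ≤ fuel →
    vis.keys = v1.keys →
    (∀ n, v1.get? n = some true → vis.get? n = some true) →
    (∀ nb ∈ l, ∃ m, Reach g start v1 m ∧ (m = start ∨ PySem.Dict.get? v1 m = some false) ∧
      nb ∈ PySem.Dict.getD g m []) →
    GoalCore g start v1 vis 0 (goListB g fuel l vis) ∧
    ∀ nb ∈ l, (goListB g fuel l vis).2.get? nb = some true

theorem pZero (g : PySem.Dict Int (List Int)) (start : Int) (v1 : PySem.Dict Int Bool) :
    PStmt g start v1 0 := by
  intro node vis hfuel
  exact absurd hfuel (by omega)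


theorem qOf (g : PySem.Dict Int (List Int)) (start : Int) (v1 : PySem.Dict Int Bool)
    (hnd : v1.keys.Nodup)
    (hnb : ∀ m : Int, Reach g start v1 m → (m = start ∨ PySem.Dict.get? v1 m = some false) →
      ∀ nb ∈ PySem.Dict.getD g m [], nb ∈ v1.keys)
    (fuel : Nat) (hP : PStmt g start v1 fuel) : QStmt g start v1 fuel := by
  intro l
  induction l with
  | nil =>
    intro vis _ hk _ _
    rw [goListB]
    exact ⟨⟨by simp, hk, le_refl _, fun n h => h, fun n h => Or.inl h, fun n h => Or.inl h⟩,
      by simp⟩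
  | cons nb t ih =>
    intro vis hfc hk hmono Hl
    obtain ⟨m, hRm, hgm, hadjm⟩ := Hl nb (List.mem_cons_self ..)
    have hkeynb : nb ∈ v1.keys := hnb m hRm hgm nb hadjm
    by_cases hg : PySem.Dict.get? vis nb = some false
    · -- unvisited neighbour: mark it, recurse, then continue with the rest
      have hv1nb : PySem.Dict.get? v1 nb = some false := by
        cases hv : PySem.Dict.get? v1 nb with
        | none =>
          rw [PySem.Dict.get?_eq_none_iff_not_mem_keys] at hv
          exact absurd hkeynb hv
        | some b =>
          cases b with
          | false => rfl
          | true => have := hmono nb hv; rw [this] at hg; cases hg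
      have hRnb : Reach g start v1 nb := Reach.step hRm hgm hadjm hv1nb
      have hndv : (vis.items.map Prod.fst).Nodup := by
        have : vis.keys = vis.items.map Prod.fst := rfl
        rw [← this, hk]; exact hnd
      obtain ⟨htc, hlen, hfcflip⟩ := flip_counts vis nb hndv hg
      have hc : vis.contains nb = true := by
        rw [PySem.Dict.contains_eq_isSome_get?, hg]; rfl
      have hins : ∀ n, (PySem.Dict.insert vis nb true).get? n =
          if n = nb then some true else vis.get? n :=
        fun n => PySem.Dict.get?_insert vis nb n true
      have hkins : (PySem.Dict.insert vis nb true).keys = v1.keys := by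
        rw [PySem.Dict.keys_insert_of_contains vis true hc]; exact hk
      have hmonoins : ∀ n, v1.get? n = some true →
          (PySem.Dict.insert vis nb true).get? n = some true := by
        intro n h
        rw [hins]; split
        · rfl
        · exact hmono n h
      obtain ⟨GP, C5P⟩ := hP nb (PySem.Dict.insert vis nb true)
        (by omega) hkins hmonoins hRnb (Or.inr hv1nb)
      set r1 := goB g fuel nb (PySem.Dict.insert vis nb true) with hr1
      obtain ⟨g1, g2, g3, g4, g5, g6⟩ := GP
      -- fuel bound for the tail: r1.2 has at least as many Trues as the flipped dict
      have hlen1 : r1.2.items.length = vis.items.length := by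
        rw [items_len_eq_keys_len, items_len_eq_keys_len, g2, ← hk]
      have htcle : tcD r1.2 ≤ r1.2.items.length := tcL_le_length _
      have hfc1 : fcD r1.2 ≤ fuel := by
        have h1 := tcL_add_fcL r1.2.items
        have h2 := tcL_add_fcL vis.items
        unfold fcD at *
        unfold tcD at *
        omega
      obtain ⟨GQ, C5Q⟩ := ih r1.2 hfc1 g2 (fun n h => g4 n (hmonoins n h))
        (fun x hx => Hl x (List.mem_cons_of_mem _ hx))
      set r2 := goListB g fuel t r1.2 with hr2
      obtain ⟨q1, q2, q3, q4, q5, q6⟩ := GQ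
      have hunf : goListB g fuel (nb :: t) vis = (r1.1 + r2.1, r2.2) := by
        rw [goListB, if_pos hg]
      rw [hunf]
      have hnbtrue1 : r1.2.get? nb = some true := g4 nb (by rw [hins, if_pos rfl])
      have hnbtrue : r2.2.get? nb = some true := q4 nb hnbtrue1
      have hvis_to_r2 : ∀ n, vis.get? n = some true → r2.2.get? n = some true := by
        intro n h
        exact q4 n (g4 n (by rw [hins]; split <;> [rfl; exact h]))
      have hpair2 : tcD (r1.1 + r2.1, r2.2).2 = tcD r2.2 := rfl
      refine ⟨⟨?_, q2, by rw [hpair2]; omega, hvis_to_r2, ?_, ?_⟩, ?_⟩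
      · show r1.1 + r2.1 = 0 + (tcD (r1.1 + r2.1, r2.2).2 : Int) - (tcD vis : Int)
        have hpair : tcD (r1.1 + r2.1, r2.2).2 = tcD r2.2 := rfl
        rw [hpair, g1, q1, htc]
        push_cast
        omega
      · -- soundness: every new True is reachable
        intro n h
        rcases q5 n h with h' | h'
        · rcases g5 n h' with h'' | h''
          · rw [hins] at h''
            by_cases hn : n = nb
            · exact Or.inr (hn ▸ hRnb)
            · rw [if_neg hn] at h''; exact Or.inl h''
          · exact Or.inr h''
        · exact Or.inr h'
      · -- saturation: every final True was initially True or has all its neighbours True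
        intro n h
        rcases q6 n h with h' | h'
        · rcases g6 n h' with h'' | h''
          · rw [hins] at h''
            by_cases hn : n = nb
            · subst hn
              exact Or.inr (fun x hx => q4 x (C5P x hx))
            · rw [if_neg hn] at h''; exact Or.inl h''
          · exact Or.inr (fun x hx => q4 x (h'' x hx))
        · exact Or.inr h'
      · -- every listed neighbour ends True
        intro x hx
        rcases List.mem_cons.mp hx with h' | h'
        · exact h' ▸ hnbtrue
        · exact C5Q x h'
    · -- already-visited neighbour (Pre_ rules out a missing key): skip it
      have hsome : PySem.Dict.get? vis nb = some true := by
        cases hv : PySem.Dict.get? vis nb with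
        | none =>
          rw [PySem.Dict.get?_eq_none_iff_not_mem_keys, hk] at hv
          exact absurd hkeynb hv
        | some b =>
          cases b with
          | false => exact absurd hv hg
          | true => rfl
      obtain ⟨GQ, C5Q⟩ := ih vis hfc hk hmono (fun x hx => Hl x (List.mem_cons_of_mem _ hx))
      have hunf : goListB g fuel (nb :: t) vis = goListB g fuel t vis := by
        rw [goListB, if_neg hg]
      rw [hunf]
      refine ⟨GQ, ?_⟩
      intro x hx
      rcases List.mem_cons.mp hx with h' | h'
      · exact h' ▸ GQ.2.2.2.1 nb hsome
      · exact C5Q x h'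

theorem pSucc (g : PySem.Dict Int (List Int)) (start : Int) (v1 : PySem.Dict Int Bool)
    (fuel : Nat) (hQ : QStmt g start v1 fuel) : PStmt g start v1 (fuel + 1) := by
  intro node vis hfc hk hmono hR hguard
  obtain ⟨GQ, C5Q⟩ := hQ (PySem.Dict.getD g node []) vis (by omega) hk hmono
    (fun nb h => ⟨node, hR, hguard, h⟩)
  have hunf : goB g (fuel + 1) node vis =
      (1 + (goListB g fuel (PySem.Dict.getD g node []) vis).1,
       (goListB g fuel (PySem.Dict.getD g node []) vis).2) := by
    rw [goB]
  rw [hunf]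
  obtain ⟨q1, q2, q3, q4, q5, q6⟩ := GQ
  exact ⟨⟨by rw [q1]; push_cast; omega, q2, q3, q4, q5, q6⟩, C5Q⟩

theorem goMaster (g : PySem.Dict Int (List Int)) (start : Int) (v1 : PySem.Dict Int Bool)
    (hnd : v1.keys.Nodup)
    (hnb : ∀ m : Int, Reach g start v1 m → (m = start ∨ PySem.Dict.get? v1 m = some false) →
      ∀ nb ∈ PySem.Dict.getD g m [], nb ∈ v1.keys) :
    ∀ fuel : Nat, PStmt g start v1 fuel := by
  intro fuel
  induction fuel with
  | zero => exact pZero g start v1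
  | succ f ih => exact pSucc g start v1 f (qOf g start v1 hnd hnb f ih)

-- invariants of A's while-loop, by functional induction on dfsLoopA
theorem foldA_sem (v1 : PySem.Dict Int Bool) (hnd : v1.keys.Nodup) :
    ∀ (ns st : List Int) (vis : PySem.Dict Int Bool),
    vis.keys = v1.keys →
    (∀ n, v1.get? n = some true → vis.get? n = some true) →
    ∃ δ : List Int,
      (ns.foldl dfsStepA (st, vis)).1 = st ++ δ ∧
      (ns.foldl dfsStepA (st, vis)).2.keys = v1.keys ∧
      tcD (ns.foldl dfsStepA (st, vis)).2 = tcD vis + δ.length ∧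
      (∀ n, vis.get? n = some true → (ns.foldl dfsStepA (st, vis)).2.get? n = some true) ∧
      (∀ n, (ns.foldl dfsStepA (st, vis)).2.get? n = some true → vis.get? n = some true ∨ n ∈ δ) ∧
      (∀ d ∈ δ, d ∈ ns ∧ v1.get? d = some false ∧ (ns.foldl dfsStepA (st, vis)).2.get? d = some true) ∧
      (∀ nb ∈ ns, (ns.foldl dfsStepA (st, vis)).2.get? nb = some true ∨ vis.get? nb = none) := by
  intro ns
  induction ns with
  | nil =>
    intro st vis hk hmono
    exact ⟨[], by simp [List.foldl], hk, by simp, fun n h => h, fun n h => Or.inl h,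
      by simp, by simp⟩
  | cons nb t ih =>
    intro st vis hk hmono
    match hg : PySem.Dict.get? vis nb with
    | some false =>
      have hstep : dfsStepA (st, vis) nb = (st ++ [nb], PySem.Dict.insert vis nb true) := by
        unfold dfsStepA; rw [hg]
      have hc : vis.contains nb = true := by
        rw [PySem.Dict.contains_eq_isSome_get?, hg]; rfl
      have hk' : (PySem.Dict.insert vis nb true).keys = v1.keys := by
        rw [PySem.Dict.keys_insert_of_contains vis true hc]; exact hk
      have hmono' : ∀ n, v1.get? n = some true → (PySem.Dict.insert vis nb true).get? n = some true := by
        intro n h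
        rw [PySem.Dict.get?_insert]
        split
        · rfl
        · exact hmono n h
      have hins : ∀ n, (PySem.Dict.insert vis nb true).get? n =
          if n = nb then some true else vis.get? n := fun n => PySem.Dict.get?_insert vis nb n true
      obtain ⟨δ', h1, h2, h3, h4, h5, h6, h7⟩ := ih (st ++ [nb]) (PySem.Dict.insert vis nb true) hk' hmono'
      have hfold : (nb :: t).foldl dfsStepA (st, vis) =
          t.foldl dfsStepA (st ++ [nb], PySem.Dict.insert vis nb true) := by
        rw [List.foldl_cons, hstep]
      rw [hfold]
      have hv1nb : v1.get? nb = some false := by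
        have hmemv : nb ∈ v1.keys := by
          rw [← hk]
          by_contra hnot
          rw [← PySem.Dict.get?_eq_none_iff_not_mem_keys] at hnot
          rw [hnot] at hg; cases hg
        cases hv : v1.get? nb with
        | none => rw [PySem.Dict.get?_eq_none_iff_not_mem_keys] at hv; exact absurd hmemv hv
        | some b =>
          cases b with
          | false => rfl
          | true => have := hmono nb hv; rw [this] at hg; cases hg
      have htc : tcD (PySem.Dict.insert vis nb true) = tcD vis + 1 := by
        have hndv : (vis.items.map Prod.fst).Nodup := by
          have : vis.keys = vis.items.map Prod.fst := rfl
          rw [← this, hk]; exact hnd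
        exact (flip_counts vis nb hndv hg).1
      refine ⟨nb :: δ', ?_, h2, ?_, ?_, ?_, ?_, ?_⟩
      · rw [h1, List.append_assoc]; rfl
      · rw [h3, htc]; simp; omega
      · intro n h
        exact h4 n (by rw [hins]; split <;> [rfl; exact h])
      · intro n h
        rcases h5 n h with h' | h'
        · rw [hins] at h'
          by_cases hn : n = nb
          · exact Or.inr (by simp [hn])
          · rw [if_neg hn] at h'; exact Or.inl h'
        · exact Or.inr (List.mem_cons_of_mem _ h')
      · intro d hd
        rcases List.mem_cons.mp hd with h' | h'
        · subst h'
          refine ⟨List.mem_cons_self .., hv1nb, ?_⟩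
          exact h4 d (by rw [hins, if_pos rfl])
        · obtain ⟨ha, hb, hcc⟩ := h6 d h'
          exact ⟨List.mem_cons_of_mem _ ha, hb, hcc⟩
      · intro x hx
        rcases List.mem_cons.mp hx with h' | h'
        · subst h'
          exact Or.inl (h4 x (by rw [hins, if_pos rfl]))
        · rcases h7 x h' with h'' | h''
          · exact Or.inl h''
          · rw [hins] at h''
            by_cases hn : x = nb
            · rw [if_pos hn] at h''; cases h''
            · rw [if_neg hn] at h''; exact Or.inr h''
    | some true =>
      have hstep : dfsStepA (st, vis) nb = (st, vis) := by unfold dfsStepA; rw [hg]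
      obtain ⟨δ', h1, h2, h3, h4, h5, h6, h7⟩ := ih st vis hk hmono
      have hfold : (nb :: t).foldl dfsStepA (st, vis) = t.foldl dfsStepA (st, vis) := by
        rw [List.foldl_cons, hstep]
      rw [hfold]
      refine ⟨δ', h1, h2, h3, h4, h5, ?_, ?_⟩
      · intro d hd
        obtain ⟨ha, hb, hcc⟩ := h6 d hd
        exact ⟨List.mem_cons_of_mem _ ha, hb, hcc⟩
      · intro x hx
        rcases List.mem_cons.mp hx with h' | h'
        · subst h'; exact Or.inl (h4 x hg)
        · exact h7 x h'
    | none =>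
      have hstep : dfsStepA (st, vis) nb = (st, vis) := by unfold dfsStepA; rw [hg]
      obtain ⟨δ', h1, h2, h3, h4, h5, h6, h7⟩ := ih st vis hk hmono
      have hfold : (nb :: t).foldl dfsStepA (st, vis) = t.foldl dfsStepA (st, vis) := by
        rw [List.foldl_cons, hstep]
      rw [hfold]
      refine ⟨δ', h1, h2, h3, h4, h5, ?_, ?_⟩
      · intro d hd
        obtain ⟨ha, hb, hcc⟩ := h6 d hd
        exact ⟨List.mem_cons_of_mem _ ha, hb, hcc⟩
      · intro x hx
        rcases List.mem_cons.mp hx with h' | h'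
        · subst h'; exact Or.inr hg
        · exact h7 x h'

theorem loopA_master (g : PySem.Dict Int (List Int)) (start : Int) (v1 : PySem.Dict Int Bool)
    (hnd : v1.keys.Nodup)
    (hnb : ∀ m : Int, Reach g start v1 m → (m = start ∨ PySem.Dict.get? v1 m = some false) →
      ∀ nb ∈ PySem.Dict.getD g m [], nb ∈ v1.keys) :
    ∀ (stack : List Int) (vis : PySem.Dict Int Bool) (count : Int),
    vis.keys = v1.keys →
    (∀ n, v1.get? n = some true → vis.get? n = some true) →
    (∀ n, vis.get? n = some true → v1.get? n = some true ∨ Reach g start v1 n) →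
    (∀ m ∈ stack, Reach g start v1 m ∧ vis.get? m = some true ∧
      (m = start ∨ v1.get? m = some false)) →
    (dfsLoopA g stack vis count).1 =
      count + stack.length + (tcD (dfsLoopA g stack vis count).2 : Int) - (tcD vis : Int) ∧
    (dfsLoopA g stack vis count).2.keys = v1.keys ∧
    (∀ n, vis.get? n = some true → (dfsLoopA g stack vis count).2.get? n = some true) ∧
    (∀ n, (dfsLoopA g stack vis count).2.get? n = some true →
      v1.get? n = some true ∨ Reach g start v1 n) ∧
    (∀ m ∈ stack, ∀ nb ∈ PySem.Dict.getD g m [],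
      (dfsLoopA g stack vis count).2.get? nb = some true) ∧
    (∀ n, (dfsLoopA g stack vis count).2.get? n = some true →
      vis.get? n = some true ∨
        ∀ nb ∈ PySem.Dict.getD g n [], (dfsLoopA g stack vis count).2.get? nb = some true) := by
  intro stack vis count
  induction stack, vis, count using dfsLoopA.induct g with
  | case1 vis count =>
    intro hk hmono hsound _hstack
    rw [dfsLoopA]
    simp only [dif_pos rfl]
    refine ⟨by simp, hk, fun n h => h, hsound, by simp, fun n h => Or.inl h⟩
  | case2 stack vis count h ih =>
    intro hk hmono hsound hstack
    have hnode := hstack (stack.getLast h) (List.getLast_mem h)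
    obtain ⟨hR, hvtrue, hguard⟩ := hnode
    obtain ⟨δ, f1, f2, f3, f4, f5, f6, f7⟩ :=
      foldA_sem v1 hnd (PySem.Dict.getD g (stack.getLast h) []) stack.dropLast vis hk hmono
    set s := (PySem.Dict.getD g (stack.getLast h) []).foldl dfsStepA (stack.dropLast, vis) with hs
    have hRδ : ∀ d ∈ δ, Reach g start v1 d ∧ s.2.get? d = some true ∧
        (d = start ∨ v1.get? d = some false) := by
      intro d hd
      obtain ⟨hadj, hv1d, hstrue⟩ := f6 d hd
      exact ⟨Reach.step hR hguard hadj hv1d, hstrue, Or.inr hv1d⟩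
    have hmemstack : ∀ m, m ∈ stack → m ∈ stack.dropLast ∨ m = stack.getLast h := by
      intro m hm
      rw [← List.dropLast_append_getLast h, List.mem_append, List.mem_singleton] at hm
      exact hm
    have ihres := ih f2
      (fun n hn => f4 n (hmono n hn))
      (by
        intro n hn
        rcases f5 n hn with h' | h'
        · exact hsound n h'
        · exact Or.inr (hRδ n h').1)
      (by
        intro m hm
        rw [f1, List.mem_append] at hm
        rcases hm with hm | hm
        · have := hstack m (List.mem_of_mem_dropLast hm)
          exact ⟨this.1, f4 m this.2.1, this.2.2⟩
        · exact hRδ m hm)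
    rw [dfsLoopA]
    simp only [dif_neg h]
    set w := dfsLoopA g s.1 s.2 (count + 1) with hw
    obtain ⟨c1, c2, c3, c4, c5, c6⟩ := ihres
    have hlen : s.1.length = stack.length - 1 + δ.length := by
      rw [f1, List.length_append, List.length_dropLast]
    have hpos : 0 < stack.length := List.length_pos_iff.mpr h
    have hnone : ∀ nb ∈ PySem.Dict.getD g (stack.getLast h) [], vis.get? nb ≠ none := by
      intro nb hadj hcon
      rw [PySem.Dict.get?_eq_none_iff_not_mem_keys, hk] at hcon
      exact hcon (hnb _ hR hguard nb hadj)
    refine ⟨?_, c2, fun n hn => c3 n (f4 n hn), c4, ?_, ?_⟩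
    · rw [c1, f3]
      push_cast
      omega
    · intro m hm nb hadj
      rcases hmemstack m hm with hm' | hm'
      · exact c5 m (by rw [f1, List.mem_append]; exact Or.inl hm') nb hadj
      · subst hm'
        rcases f7 nb hadj with h' | h'
        · exact c3 nb h'
        · exact absurd h' (hnone nb hadj)
    · intro n hn
      rcases c6 n hn with h' | h'
      · rcases f5 n h' with h'' | h''
        · exact Or.inl h''
        · exact Or.inr (c5 n (by rw [f1, List.mem_append]; exact Or.inr h''))
      · exact Or.inr h'

-- two dicts with the same nodup key list and the same True-set hold the same number of Trues
theorem tcD_congr (d e : PySem.Dict Int Bool) (hk : d.keys = e.keys) (hnd : d.keys.Nodup)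
    (h : ∀ n, d.get? n = some true ↔ e.get? n = some true) : tcD d = tcD e := by
  have hnde : e.keys.Nodup := hk ▸ hnd
  have hd := PySem.Dict.items_eq_map_keys d hnd false
  have he := PySem.Dict.items_eq_map_keys e hnde false
  unfold tcD tcL
  rw [hd, he, ← hk]
  rw [List.filter_map, List.filter_map, List.length_map, List.length_map]
  congr 1
  apply List.filter_congr
  intro k hkmem
  show d.getD k false = e.getD k false
  cases hdk : d.get? k with
  | none =>
    exact absurd hkmem ((PySem.Dict.get?_eq_none_iff_not_mem_keys d k).mp hdk)
  | some b =>
    cases b with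
    | true =>
      rw [PySem.Dict.getD_of_get?_eq_some d false hdk,
        PySem.Dict.getD_of_get?_eq_some e false ((h k).mp hdk)]
    | false =>
      cases hek : e.get? k with
      | none =>
        exact absurd (hk ▸ hkmem) ((PySem.Dict.get?_eq_none_iff_not_mem_keys e k).mp hek)
      | some be =>
        cases be with
        | true =>
          have := (h k).mpr hek
          rw [this] at hdk; cases hdk
        | false =>
          rw [PySem.Dict.getD_of_get?_eq_some d false hdk, PySem.Dict.getD_of_get?_eq_some e false hek]

-- every reachable node ends up marked, given the saturation facts of a master lemma
theorem reach_final (g : PySem.Dict Int (List Int)) (start : Int) (v1 w : PySem.Dict Int Bool)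
    (hv1s : v1.get? start = some true)
    (hmono : ∀ n, v1.get? n = some true → w.get? n = some true)
    (hsatstart : ∀ nb ∈ PySem.Dict.getD g start [], w.get? nb = some true)
    (hsatall : ∀ n, w.get? n = some true →
      v1.get? n = some true ∨ ∀ nb ∈ PySem.Dict.getD g n [], w.get? nb = some true) :
    ∀ n, Reach g start v1 n → w.get? n = some true := by
  intro n hr
  induction hr with
  | base => exact hmono start hv1s
  | step hm hguard hadj hv1n ih =>
    rcases hguard with hg' | hg'
    · subst hg'
      exact hsatstart _ hadj
    · rcases hsatall _ ih with h' | h'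
      · rw [h'] at hg'; cases hg'
      · exact h' _ hadj

theorem pvStep_append (visited : List (Int × Bool)) (start : Int) (acc : List Int) (nb : Int) :
    ∃ ε, (if nb ≠ start ∧ PySem.Dict.get? (PySem.Dict.mk visited) nb = some false
      then PySem.Set.add acc nb else acc) = acc ++ ε := by
  split
  · unfold PySem.Set.add
    split
    · exact ⟨[], (List.append_nil acc).symm⟩
    · exact ⟨[nb], rfl⟩
  · exact ⟨[], (List.append_nil acc).symm⟩

theorem pvInner_append (visited : List (Int × Bool)) (start : Int) (ns : List Int) :
    ∀ acc : List Int, ∃ δ,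
      ns.foldl (fun acc2 nb =>
        if nb ≠ start ∧ PySem.Dict.get? (PySem.Dict.mk visited) nb = some false
        then PySem.Set.add acc2 nb else acc2) acc = acc ++ δ := by
  induction ns with
  | nil => intro acc; exact ⟨[], (List.append_nil acc).symm⟩
  | cons nb t ih =>
    intro acc
    obtain ⟨ε, hε⟩ := pvStep_append visited start acc nb
    obtain ⟨δ', hδ'⟩ := ih (acc ++ ε)
    refine ⟨ε ++ δ', ?_⟩
    rw [List.foldl_cons, hε, hδ', List.append_assoc]

theorem pvInner_mem (visited : List (Int × Bool)) (start : Int) (ns : List Int) :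
    ∀ (acc : List Int) (nb : Int), nb ∈ ns →
      nb ≠ start ∧ PySem.Dict.get? (PySem.Dict.mk visited) nb = some false →
      nb ∈ ns.foldl (fun acc2 nb =>
        if nb ≠ start ∧ PySem.Dict.get? (PySem.Dict.mk visited) nb = some false
        then PySem.Set.add acc2 nb else acc2) acc := by
  induction ns with
  | nil => intro acc nb h; cases h
  | cons a t ih =>
    intro acc nb hmem hcond
    rw [List.foldl_cons]
    rcases List.mem_cons.mp hmem with h' | h'
    · subst h'
      obtain ⟨δ', hδ'⟩ := pvInner_append visited start t
        (if nb ≠ start ∧ PySem.Dict.get? (PySem.Dict.mk visited) nb = some false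
          then PySem.Set.add acc nb else acc)
      rw [hδ', if_pos hcond]
      exact List.mem_append.mpr (Or.inl ((PySem.Set.mem_add acc nb nb).mpr (Or.inr rfl)))
    · exact ih _ nb h' hcond

theorem pvInner_support (visited : List (Int × Bool)) (start : Int) (ns : List Int) :
    ∀ (acc : List Int) (x : Int),
      x ∈ ns.foldl (fun acc2 nb =>
        if nb ≠ start ∧ PySem.Dict.get? (PySem.Dict.mk visited) nb = some false
        then PySem.Set.add acc2 nb else acc2) acc →
      x ∈ acc ∨ PySem.Dict.get? (PySem.Dict.mk visited) x = some false := by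
  induction ns with
  | nil => intro acc x h; exact Or.inl h
  | cons a t ih =>
    intro acc x h
    rw [List.foldl_cons] at h
    rcases ih _ x h with h' | h'
    · by_cases hc : a ≠ start ∧ PySem.Dict.get? (PySem.Dict.mk visited) a = some false
      · rw [if_pos hc] at h'
        rcases (PySem.Set.mem_add acc a x).mp h' with h'' | h''
        · exact Or.inl h''
        · subst h''; exact Or.inr hc.2
      · rw [if_neg hc] at h'; exact Or.inl h'
    · exact Or.inr h'

theorem pvInner_nodup (visited : List (Int × Bool)) (start : Int) (ns : List Int) :
    ∀ acc : List Int, acc.Nodup →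
      (ns.foldl (fun acc2 nb =>
        if nb ≠ start ∧ PySem.Dict.get? (PySem.Dict.mk visited) nb = some false
        then PySem.Set.add acc2 nb else acc2) acc).Nodup := by
  induction ns with
  | nil => intro acc h; exact h
  | cons a t ih =>
    intro acc h
    rw [List.foldl_cons]
    apply ih
    split
    · exact PySem.Set.nodup_add acc a h
    · exact h

theorem pvExpand_append (graph : List (Int × List Int)) (visited : List (Int × Bool))
    (start : Int) : ∀ (L acc : List Int), ∃ δ,
      L.foldl (fun acc m =>
        ((PySem.Dict.mk graph).getD m []).foldl (fun acc2 nb =>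
          if nb ≠ start ∧ PySem.Dict.get? (PySem.Dict.mk visited) nb = some false
          then PySem.Set.add acc2 nb else acc2) acc) acc = acc ++ δ := by
  intro L
  induction L with
  | nil => intro acc; exact ⟨[], (List.append_nil acc).symm⟩
  | cons m t ih =>
    intro acc
    obtain ⟨ε, hε⟩ := pvInner_append visited start ((PySem.Dict.mk graph).getD m []) acc
    obtain ⟨δ', hδ'⟩ := ih (acc ++ ε)
    refine ⟨ε ++ δ', ?_⟩
    rw [List.foldl_cons, hε, hδ', List.append_assoc]

theorem pvExpand_eq_append (graph : List (Int × List Int)) (visited : List (Int × Bool))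
    (start : Int) (S : List Int) : ∃ δ, pvExpand graph visited start S = S ++ δ :=
  pvExpand_append graph visited start S S

theorem pvExpand_support (graph : List (Int × List Int)) (visited : List (Int × Bool))
    (start : Int) : ∀ (L acc : List Int) (x : Int),
      x ∈ L.foldl (fun acc m =>
        ((PySem.Dict.mk graph).getD m []).foldl (fun acc2 nb =>
          if nb ≠ start ∧ PySem.Dict.get? (PySem.Dict.mk visited) nb = some false
          then PySem.Set.add acc2 nb else acc2) acc) acc →
      x ∈ acc ∨ PySem.Dict.get? (PySem.Dict.mk visited) x = some false := by
  intro L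
  induction L with
  | nil => intro acc x h; exact Or.inl h
  | cons m t ih =>
    intro acc x h
    rw [List.foldl_cons] at h
    rcases ih _ x h with h' | h'
    · exact pvInner_support visited start _ acc x h'
    · exact Or.inr h'

theorem pvExpand_nodup (graph : List (Int × List Int)) (visited : List (Int × Bool))
    (start : Int) : ∀ (L acc : List Int), acc.Nodup →
      (L.foldl (fun acc m =>
        ((PySem.Dict.mk graph).getD m []).foldl (fun acc2 nb =>
          if nb ≠ start ∧ PySem.Dict.get? (PySem.Dict.mk visited) nb = some false
          then PySem.Set.add acc2 nb else acc2) acc) acc).Nodup := by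
  intro L
  induction L with
  | nil => intro acc h; exact h
  | cons m t ih =>
    intro acc h
    rw [List.foldl_cons]
    exact ih _ (pvInner_nodup visited start _ acc h)

theorem pvExpand_mem_of (graph : List (Int × List Int)) (visited : List (Int × Bool))
    (start : Int) (S : List Int) (m nb : Int) (hm : m ∈ S)
    (hadj : nb ∈ PySem.Dict.getD (PySem.Dict.mk graph) m [])
    (hcond : nb ≠ start ∧ PySem.Dict.get? (PySem.Dict.mk visited) nb = some false) :
    nb ∈ pvExpand graph visited start S := by
  unfold pvExpand
  have main : ∀ (L acc : List Int), m ∈ L →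
      nb ∈ L.foldl (fun acc m =>
        ((PySem.Dict.mk graph).getD m []).foldl (fun acc2 nb =>
          if nb ≠ start ∧ PySem.Dict.get? (PySem.Dict.mk visited) nb = some false
          then PySem.Set.add acc2 nb else acc2) acc) acc := by
    intro L
    induction L with
    | nil => intro acc h; cases h
    | cons a t ih =>
      intro acc hmem
      rw [List.foldl_cons]
      rcases List.mem_cons.mp hmem with h' | h'
      · subst h'
        obtain ⟨δ', hδ'⟩ := pvExpand_append graph visited start t
          (((PySem.Dict.mk graph).getD m []).foldl (fun acc2 nb =>
            if nb ≠ start ∧ PySem.Dict.get? (PySem.Dict.mk visited) nb = some false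
            then PySem.Set.add acc2 nb else acc2) acc)
        rw [hδ']
        exact List.mem_append.mpr
          (Or.inl (pvInner_mem visited start _ acc nb hadj hcond))
      · exact ih _ h'
  exact main S S hm

theorem pvReached_start_mem (graph : List (Int × List Int)) (visited : List (Int × Bool))
    (start : Int) : start ∈ pvReached graph visited start := by
  unfold pvReached
  have : ∀ k, start ∈ (pvExpand graph visited start)^[k] [start] := by
    intro k
    induction k with
    | zero => simp
    | succ k ih =>
      rw [Function.iterate_succ_apply']
      obtain ⟨δ, hδ⟩ := pvExpand_eq_append graph visited start
        ((pvExpand graph visited start)^[k] [start])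
      rw [hδ]
      exact List.mem_append.mpr (Or.inl ih)
  exact this _

theorem pvReached_bound (graph : List (Int × List Int)) (visited : List (Int × Bool))
    (start : Int) : ∀ k,
    ((pvExpand graph visited start)^[k] [start]).Nodup ∧
    (∀ x ∈ (pvExpand graph visited start)^[k] [start],
      x ∈ start :: visited.map Prod.fst) := by
  intro k
  induction k with
  | zero =>
    refine ⟨List.nodup_singleton _, ?_⟩
    intro x hx
    rw [Function.iterate_zero_apply, List.mem_singleton] at hx
    exact hx ▸ List.mem_cons_self ..
  | succ k ih =>
    rw [Function.iterate_succ_apply']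
    refine ⟨pvExpand_nodup graph visited start _ _ ih.1, ?_⟩
    intro x hx
    rcases pvExpand_support graph visited start _ _ x hx with h' | h'
    · exact ih.2 x h'
    · right
      by_contra hn
      have : x ∉ (PySem.Dict.mk visited).keys := hn
      rw [← PySem.Dict.get?_eq_none_iff_not_mem_keys] at this
      rw [this] at h'; cases h'

theorem pvNodupSubLen (l l' : List Int) (hnd : l.Nodup) (hsub : ∀ x ∈ l, x ∈ l') :
    l.length ≤ l'.length := by
  have h1 : l.toFinset.card = l.length := List.toFinset_card_of_nodup hnd
  have h2 : l.toFinset ⊆ l'.toFinset := by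
    intro x hx
    rw [List.mem_toFinset] at hx ⊢
    exact hsub x hx
  have h3 := Finset.card_le_card h2
  have h4 := List.toFinset_card_le l'
  omega

theorem pvReached_closed (graph : List (Int × List Int)) (visited : List (Int × Bool))
    (start : Int) :
    pvExpand graph visited start (pvReached graph visited start) =
      pvReached graph visited start := by
  have persist : ∀ j, pvExpand graph visited start
        ((pvExpand graph visited start)^[j] [start]) =
        (pvExpand graph visited start)^[j] [start] →
      ∀ i, (pvExpand graph visited start)^[j + i] [start] =
        (pvExpand graph visited start)^[j] [start] := by
    intro j hfix i
    induction i with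
    | zero => rfl
    | succ i ih =>
      have : j + (i + 1) = (j + i) + 1 := by omega
      rw [this, Function.iterate_succ_apply', ih, hfix]
  have stab : ∀ k,
      (∃ j, j ≤ k ∧ pvExpand graph visited start
          ((pvExpand graph visited start)^[j] [start]) =
          (pvExpand graph visited start)^[j] [start]) ∨
      k + 1 ≤ ((pvExpand graph visited start)^[k] [start]).length := by
    intro k
    induction k with
    | zero => right; simp
    | succ k ih =>
      rcases ih with ⟨j, hj, hfix⟩ | hlen
      · exact Or.inl ⟨j, Nat.le_succ_of_le hj, hfix⟩
      · by_cases hfix : pvExpand graph visited start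
            ((pvExpand graph visited start)^[k] [start]) =
            (pvExpand graph visited start)^[k] [start]
        · exact Or.inl ⟨k, Nat.le_succ k, hfix⟩
        · right
          rw [Function.iterate_succ_apply']
          obtain ⟨δ, hδ⟩ := pvExpand_eq_append graph visited start
            ((pvExpand graph visited start)^[k] [start])
          have hδne : δ ≠ [] := by
            intro hnil
            rw [hnil, List.append_nil] at hδ
            exact hfix hδ
          have : 1 ≤ δ.length := List.length_pos_iff.mpr hδne
          rw [hδ, List.length_append]
          omega
  rcases stab (visited.length + 1) with ⟨j, hj, hfix⟩ | hlen
  · unfold pvReached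
    have hsplit : visited.length + 1 = j + (visited.length + 1 - j) := by omega
    rw [hsplit, persist j hfix]
    exact hfix
  · exfalso
    obtain ⟨hnd, hsub⟩ := pvReached_bound graph visited start (visited.length + 1)
    have := pvNodupSubLen _ (start :: visited.map Prod.fst) hnd hsub
    simp only [List.length_cons, List.length_map] at this
    omega

theorem dfs_spec : Claim_equal_dfs := by
  intro graph start visited _hdom hpre
  obtain ⟨hnodup, hpg⟩ := hpre
  unfold Spec_dfs dfs dfs_alt
  set g := PySem.Dict.mk graph with hgdef
  set v1 := PySem.Dict.insert (PySem.Dict.mk visited) start true with hv1def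
  have hnod0 : (PySem.Dict.mk visited).keys.Nodup := hnodup
  have hnd : v1.keys.Nodup := PySem.Dict.nodup_keys_insert _ _ _ hnod0
  have hv1s : v1.get? start = some true := PySem.Dict.get?_insert_self _ _ _
  have hsound : ∀ n, Reach g start v1 n → (n = start ∨ PySem.Dict.get? v1 n = some false) →
      n ∈ pvReached graph visited start := by
    intro n hr
    induction hr with
    | base => intro _; exact pvReached_start_mem graph visited start
    | @step m' n' hm hguard hadj hv1n ih =>
      intro _
      have hcond : n' ≠ start ∧ PySem.Dict.get? (PySem.Dict.mk visited) n' = some false := by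
        rw [PySem.Dict.get?_insert] at hv1n
        by_cases hns : n' = start
        · rw [if_pos hns] at hv1n; cases hv1n
        · rw [if_neg hns] at hv1n; exact ⟨hns, hv1n⟩
      have hmem := pvExpand_mem_of graph visited start _ m' n' (ih hguard) hadj hcond
      rw [pvReached_closed graph visited start] at hmem
      exact hmem
  have hnb : ∀ m : Int, Reach g start v1 m → (m = start ∨ PySem.Dict.get? v1 m = some false) →
      ∀ nb ∈ PySem.Dict.getD g m [], nb ∈ v1.keys := by
    intro m hr hguard nb hadj
    rcases (hpg m (hsound m hr hguard)).2 nb hadj with h | h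
    · rw [h]; exact (PySem.Dict.mem_keys_insert _ _ _ _).mpr (Or.inl rfl)
    · exact (PySem.Dict.mem_keys_insert _ _ _ _).mpr (Or.inr h)
  have hinit : ∀ m ∈ [start], Reach g start v1 m ∧ v1.get? m = some true ∧
      (m = start ∨ v1.get? m = some false) := by
    intro m hm
    have hms : m = start := by simpa using hm
    subst hms
    exact ⟨Reach.base, hv1s, Or.inl rfl⟩
  obtain ⟨a1, a2, a3, a4, a5, a6⟩ :=
    loopA_master g start v1 hnd hnb [start] v1 0 rfl (fun n h => h) (fun n h => Or.inl h) hinit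
  obtain ⟨⟨b1, b2, b3, b4, b5, b6⟩, bC5⟩ :=
    goMaster g start v1 hnd hnb (fcD v1 + 1) start v1 (le_refl _) rfl (fun n h => h)
      Reach.base (Or.inl rfl)
  set wA := (dfsLoopA g [start] v1 0).2 with hwA
  set wB := (goB g (fcD v1 + 1) start v1).2 with hwB
  have hcompA : ∀ n, Reach g start v1 n → wA.get? n = some true :=
    reach_final g start v1 wA hv1s a3 (a5 start (by simp)) a6
  have hcompB : ∀ n, Reach g start v1 n → wB.get? n = some true :=
    reach_final g start v1 wB hv1s b4
      (fun nb h => bC5 nb h)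
      (fun n h => (b6 n h).imp id id)
  have hchar : ∀ n, wA.get? n = some true ↔ wB.get? n = some true := by
    intro n
    constructor
    · intro h
      rcases a4 n h with h' | h'
      · exact b4 n h'
      · exact hcompB n h'
    · intro h
      rcases b5 n h with h' | h'
      · exact a3 n h'
      · exact hcompA n h'
  have htc : tcD wA = tcD wB := tcD_congr wA wB (a2.trans b2.symm) (by rw [a2]; exact hnd) hchar
  rw [a1, b1, htc]
  simp
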